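-- pv_equiv track=rewrite | github.com/JIMIN-SONG-1/Medical_AI | gesture-recognition-master/AirDraw_with_Gestures.py | is_heart
-- ===== SOURCE A (Python) =====
-- import math
--
-- def is_heart(traj):
--     if len(traj) < 5:
--         return False
--     xs = [pt[0] for pt in traj]
--     ys = [pt[1] for pt in traj]
--     width = max(xs) - min(xs)
--     height = max(ys) - min(ys)
--     closed = math.hypot(xs[0] - xs[-1], ys[0] - ys[-1]) < 150
--     round_enough = width > 10 and height > 10
--     return closed and round_enough
-- ===== SOURCE B (Python) =====
-- def _bbox(pts):
--     # divide-and-conquer bounding box: (min_x, max_x, min_y, max_y)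
--     if len(pts) == 1:
--         pt = pts[0]
--         return (pt[0], pt[0], pt[1], pt[1])
--     mid = len(pts) // 2
--     a = _bbox(pts[:mid])
--     b = _bbox(pts[mid:])
--     return (min(a[0], b[0]), max(a[1], b[1]), min(a[2], b[2]), max(a[3], b[3]))
--
-- def is_heart(traj):
--     # Divide-and-conquer bounding box (merge of half-boxes) + exact integer distance test.
--     if len(traj) < 5:
--         return False
--     min_x, max_x, min_y, max_y = _bbox(traj)
--     first = traj[0]
--     last = traj[-1]
--     dx = first[0] - last[0]
--     dy = first[1] - last[1]
--     return dx * dx + dy * dy < 22500 and max_x - min_x > 10 and max_y - min_y > 10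
-- ===== Notes on version B (the rewrite author's own statement) =====
-- stated objective: alternative
-- what changed: The bounding box is computed by a recursive divide-and-conquer that splits the trajectory in half and merges the two half-boxes, instead of building xs/ys lists and running four separate max/min scans; the endpoint distance is compared in exact integer arithmetic (dx*dx+dy*dy < 150**2) instead of float hypot.
import Mathlib
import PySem

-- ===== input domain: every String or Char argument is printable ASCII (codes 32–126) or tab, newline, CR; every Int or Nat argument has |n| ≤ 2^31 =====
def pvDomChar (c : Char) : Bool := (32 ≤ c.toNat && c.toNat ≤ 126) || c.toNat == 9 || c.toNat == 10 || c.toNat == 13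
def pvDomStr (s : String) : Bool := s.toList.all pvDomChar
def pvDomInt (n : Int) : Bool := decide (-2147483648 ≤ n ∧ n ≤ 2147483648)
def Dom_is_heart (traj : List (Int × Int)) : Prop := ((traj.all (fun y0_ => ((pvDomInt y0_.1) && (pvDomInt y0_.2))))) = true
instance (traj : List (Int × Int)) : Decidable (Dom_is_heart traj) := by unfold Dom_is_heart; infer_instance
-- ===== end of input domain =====

-- B: the bounding box is computed by a recursive divide-and-conquer (split in half, merge
-- half-boxes) instead of two intermediate lists and four max/min scans; the endpoint
-- distance test is exact integer arithmetic (objective: alternative).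


-- ===== PORT A =====
-- 'math.hypot(dx, dy) < 150' is ported as 'dx*dx + dy*dy < 22500'; this is exact for the
-- integer arguments admitted by Dom_is_heart (near the 150 boundary |dx|,|dy| ≤ 150, where
-- float sqrt is far more accurate than the 150 - sqrt(22499) gap).
def is_heart (traj : List (Int × Int)) : Bool :=
  if traj.length < 5 then false
  else
    let xs := traj.map (fun pt => pt.1)
    let ys := traj.map (fun pt => pt.2)
    let width := (PySem.List.max? xs (fun x => x)).getD 0 - (PySem.List.min? xs (fun x => x)).getD 0
    let height := (PySem.List.max? ys (fun y => y)).getD 0 - (PySem.List.min? ys (fun y => y)).getD 0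
    let dx := (PySem.List.pyGet? xs 0).getD 0 - (PySem.List.pyGet? xs (-1)).getD 0
    let dy := (PySem.List.pyGet? ys 0).getD 0 - (PySem.List.pyGet? ys (-1)).getD 0
    let closed := decide (dx * dx + dy * dy < 22500)
    let round_enough := decide (width > 10) && decide (height > 10)
    closed && round_enough

-- ===== PORT B =====
def bboxMerge (a b : Int × Int × Int × Int) : Int × Int × Int × Int :=
  (min a.1 b.1, max a.2.1 b.2.1, min a.2.2.1 b.2.2.1, max a.2.2.2 b.2.2.2)

-- port of _bbox; Python's pts[:mid]/pts[mid:] with 0 ≤ mid ≤ len are exactly take/drop.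
-- Python _bbox never returns on []; the [] branch here is unreachable from is_heart_alt.
def bbox : List (Int × Int) → Int × Int × Int × Int
  | [] => (0, 0, 0, 0)
  | [p] => (p.1, p.1, p.2, p.2)
  | p :: q :: t =>
    let pts := p :: q :: t
    let mid := pts.length / 2
    bboxMerge (bbox (pts.take mid)) (bbox (pts.drop mid))
termination_by l => l.length
decreasing_by
  · simp [List.length_take]; omega
  · simp [List.length_drop]; omega

def is_heart_alt (traj : List (Int × Int)) : Bool :=
  if traj.length < 5 then false
  else
    let b := bbox traj
    let first := (PySem.List.pyGet? traj 0).getD (0, 0)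
    let last := (PySem.List.pyGet? traj (-1)).getD (0, 0)
    let dx := first.1 - last.1
    let dy := first.2 - last.2
    decide (dx * dx + dy * dy < 22500) && decide (b.2.1 - b.1 > 10) && decide (b.2.2.2 - b.2.2.1 > 10)

-- ===== PRECONDITION & SPEC =====
def Spec_is_heart (traj : List (Int × Int)) (out : Bool) : Prop := out = is_heart_alt traj
instance (traj : List (Int × Int)) (out : Bool) : Decidable (Spec_is_heart traj out) := by unfold Spec_is_heart; infer_instance

-- ===== CLAIM =====
def Claim_equal_is_heart : Prop := ∀ (traj : List (Int × Int)), Dom_is_heart traj → Spec_is_heart traj (is_heart traj)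

-- ===== LEMMAS AND PROOFS =====
theorem foldl_min_min (l : List Int) : ∀ a b : Int, l.foldl min (min a b) = min a (l.foldl min b) := by
  induction l with
  | nil => intro a b; rfl
  | cons c t ih => intro a b; simp only [List.foldl_cons, min_assoc, ih]

theorem foldl_max_max (l : List Int) : ∀ a b : Int, l.foldl max (max a b) = max a (l.foldl max b) := by
  induction l with
  | nil => intro a b; rfl
  | cons c t ih => intro a b; simp only [List.foldl_cons, max_assoc, ih]

theorem bbox_spec (n : Nat) : ∀ (p : Int × Int) (t : List (Int × Int)), (p :: t).length ≤ n →
    bbox (p :: t) = ((t.map Prod.fst).foldl min p.1, (t.map Prod.fst).foldl max p.1,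
                     (t.map Prod.snd).foldl min p.2, (t.map Prod.snd).foldl max p.2) := by
  induction n with
  | zero => intro p t h; simp at h
  | succ n ih =>
    intro p t hlen
    match t with
    | [] => simp [bbox]
    | q :: t' =>
      rw [bbox]
      have hmid1 : 1 ≤ (p :: q :: t').length / 2 := by simp; omega
      have hmid2 : (p :: q :: t').length / 2 < (p :: q :: t').length := by simp; omega
      set l : List (Int × Int) := p :: q :: t' with hl
      set mid := l.length / 2 with hm
      have htake : l.take mid = p :: ((q :: t').take (mid - 1)) := by
        rw [hl]; cases hmm : mid with
        | zero => omega
        | succ k => simp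
      have hdrop : l.drop mid = (q :: t').drop (mid - 1) := by
        rw [hl]; cases hmm : mid with
        | zero => omega
        | succ k => simp
      set t1 := (q :: t').take (mid - 1) with ht1
      have hd_ne : l.drop mid ≠ [] := by
        intro hnil
        have := List.length_drop (l := l) (i := mid)
        rw [hnil] at this; simp at this; omega
      obtain ⟨p2, t2, ht2⟩ : ∃ p2 t2, l.drop mid = p2 :: t2 := by
        cases hdd : l.drop mid with
        | nil => exact absurd hdd hd_ne
        | cons a b => exact ⟨a, b, rfl⟩
      have hsplit : t1 ++ p2 :: t2 = q :: t' := by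
        have h := List.take_append_drop mid l
        rw [htake, ht2] at h
        rw [hl] at h
        simpa using h
      have hlL : l.length = t'.length + 2 := by simp [hl]
      have hlt1 : t1.length = mid - 1 := by
        rw [ht1, List.length_take]; simp; omega
      have hlen1 : (p :: t1).length ≤ n := by
        simp [hlt1]; omega
      have hlen2 : (p2 :: t2).length ≤ n := by
        have h := congrArg List.length ht2
        rw [List.length_drop] at h
        simp only [List.length_cons] at h ⊢
        omega
      rw [htake, ht2, ih p t1 hlen1, ih p2 t2 hlen2]
      rw [← hsplit]
      simp only [bboxMerge, List.map_append, List.map_cons, List.foldl_append, List.foldl_cons]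
      simp only [foldl_min_min, foldl_max_max]

theorem is_heart_spec : Claim_equal_is_heart := by
  intro traj _
  unfold Spec_is_heart is_heart is_heart_alt
  by_cases h5 : traj.length < 5
  · simp [h5]
  · match traj, h5 with
    | (x0, y0) :: rest, h5 =>
      rw [bbox_spec ((x0, y0) :: rest).length (x0, y0) rest le_rfl]
      simp only [if_neg h5, List.map_cons, PySem.List.max?_id_cons, PySem.List.min?_id_cons,
        PySem.List.pyGet?_zero_cons, PySem.List.pyGet?_neg_one, Option.getD_some]
      cases hL : ((x0, y0) :: rest).getLast? with
      | none => simp [List.getLast?_eq_none_iff] at hL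
      | some p =>
        have h1 : (x0 :: rest.map (fun pt : Int × Int => pt.1)).getLast? = some p.1 := by
          have h := List.getLast?_map (f := fun pt : Int × Int => pt.1) (l := (x0, y0) :: rest)
          simp only [List.map_cons] at h
          rw [h, hL]; rfl
        have h2 : (y0 :: rest.map (fun pt : Int × Int => pt.2)).getLast? = some p.2 := by
          have h := List.getLast?_map (f := fun pt : Int × Int => pt.2) (l := (x0, y0) :: rest)
          simp only [List.map_cons] at h
          rw [h, hL]; rfl
        rw [h1, h2]; simp only [Option.getD_some, gt_iff_lt, Bool.and_assoc]; rfl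

-- ===== VERDICT =====
-- (is_heart_spec above proves Claim_equal_is_heart by name.)
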